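-- pv_equiv track=rewrite | github.com/Tanay-27/Data_Structures_and_Algorithms_Practise | gfgPractise/test.py | canReachTrackEnd
-- ===== SOURCE A (Python) =====
-- def calcPosNTimes(times,k):
--     trackLen = 0
--     if times == -1:
--         while(k>0):
--             trackLen += k
--             k -= 1
--     else:
--         while(times > 0 and k>0):
--             trackLen += k
--             k -= 1
--             times -= 1
--
--     return trackLen
--
-- def canReachTrackEnd(trackLength, spells, k):
--     position = 0
--     spellLen = len(spells)
--     # calc for n-1 spells with end range
--     for spell in range(0,spellLen-1):
--         position += calcPosNTimes(spells[spell+1]-spells[spell],k)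
--         if position >= trackLength:
--             return True
--     # calc for last spell if required
--     position += calcPosNTimes(-1,k)
--     if position >= trackLength:
--         return True
--     # if cannot reach end
--     return False
-- ===== SOURCE B (Python) =====
-- def canReachTrackEnd(trackLength, spells, k):
--     # position only ever grows, so the early exit in the loop is redundant:
--     # compute the grand total with closed-form arithmetic sums and compare once.
--     def contrib(times):
--         if k <= 0:
--             return 0
--         if times == -1:
--             return k * (k + 1) // 2
--         if times <= 0:
--             return 0
--         t = min(times, k)
--         return t * k - t * (t - 1) // 2
--     total = sum(contrib(b - a) for a, b in zip(spells, spells[1:])) + contrib(-1)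
--     return total >= trackLength
-- ===== Notes on version B (the rewrite author's own statement) =====
-- stated objective: alternative
-- what changed: Replaces the inner countdown loops with closed-form arithmetic-series formulas and drops the per-step early exit (each contribution is nonnegative so the position is monotone): one pass over consecutive pairs plus a single final comparison.
import Mathlib
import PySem

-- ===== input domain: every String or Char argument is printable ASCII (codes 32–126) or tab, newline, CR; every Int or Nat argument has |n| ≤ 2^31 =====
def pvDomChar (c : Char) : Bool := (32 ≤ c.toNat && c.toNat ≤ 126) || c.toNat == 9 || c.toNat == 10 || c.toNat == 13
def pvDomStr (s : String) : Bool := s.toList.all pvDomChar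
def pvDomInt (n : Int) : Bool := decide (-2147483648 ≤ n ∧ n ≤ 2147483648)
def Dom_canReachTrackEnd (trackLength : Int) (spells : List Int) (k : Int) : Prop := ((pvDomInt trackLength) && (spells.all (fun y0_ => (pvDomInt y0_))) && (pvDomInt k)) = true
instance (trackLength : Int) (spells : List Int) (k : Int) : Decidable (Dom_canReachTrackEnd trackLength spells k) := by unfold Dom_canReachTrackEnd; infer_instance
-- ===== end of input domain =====

-- B replaces the inner countdown loops by closed-form arithmetic-series sums and drops the
-- (redundant, since every contribution is nonnegative) early exit: one pass, one final comparison.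

-- ===== PORT A =====
-- while(k>0): trackLen += k; k -= 1   (the times == -1 branch of calcPosNTimes)
def calcNegAux (trackLen k : Int) : Int :=
  if _h : 0 < k then calcNegAux (trackLen + k) (k - 1) else trackLen
termination_by k.toNat
decreasing_by omega

-- while(times > 0 and k > 0): trackLen += k; k -= 1; times -= 1
def calcPosAux (trackLen times k : Int) : Int :=
  if _h : 0 < times ∧ 0 < k then calcPosAux (trackLen + k) (times - 1) (k - 1) else trackLen
termination_by k.toNat
decreasing_by omega

def calcPosNTimes (times k : Int) : Int :=
  if times = -1 then calcNegAux 0 k else calcPosAux 0 times k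

-- the for-loop over range(0, spellLen-1), with early return; indices are always in range,
-- so pyGetD with default 0 is exact here
def aLoop (trackLength k : Int) (spells : List Int) : Int → List Int → Bool
  | position, [] =>
      let position := position + calcPosNTimes (-1) k
      decide (position ≥ trackLength)
  | position, i :: rest =>
      let position := position + calcPosNTimes (PySem.List.pyGetD spells (i + 1) 0 - PySem.List.pyGetD spells i 0) k
      if position ≥ trackLength then true else aLoop trackLength k spells position rest

def canReachTrackEnd (trackLength : Int) (spells : List Int) (k : Int) : Bool :=
  aLoop trackLength k spells 0 (PySem.List.pyRange 0 ((spells.length : Int) - 1) 1)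

-- ===== PORT B =====
-- closed-form contribution of one gap (Source B's 'contrib', with k explicit)
def contribB (k times : Int) : Int :=
  if k ≤ 0 then 0
  else if times = -1 then PySem.Int.floordiv (k * (k + 1)) 2
  else if times ≤ 0 then 0
  else
    let t := min times k
    t * k - PySem.Int.floordiv (t * (t - 1)) 2

def canReachTrackEnd_alt (trackLength : Int) (spells : List Int) (k : Int) : Bool :=
  let total :=
    ((spells.zip (PySem.List.slice spells (some 1) none)).foldl
      (fun acc p => acc + contribB k (p.2 - p.1)) 0) + contribB k (-1)
  decide (total ≥ trackLength)

-- ===== PRECONDITION & SPEC =====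
def Spec_canReachTrackEnd (trackLength : Int) (spells : List Int) (k : Int) (out : Bool) : Prop := out = canReachTrackEnd_alt trackLength spells k
instance (trackLength : Int) (spells : List Int) (k : Int) (out : Bool) : Decidable (Spec_canReachTrackEnd trackLength spells k out) := by unfold Spec_canReachTrackEnd; infer_instance

-- ===== CLAIM (what is proved, stated in full; the proofs are below) =====
def Claim_equal_canReachTrackEnd : Prop := ∀ (trackLength : Int) (spells : List Int) (k : Int), Dom_canReachTrackEnd trackLength spells k → Spec_canReachTrackEnd trackLength spells k (canReachTrackEnd trackLength spells k)

-- ===== LEMMAS AND PROOFS =====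

-- the -1 countdown loop, doubled: twice the loop's sum is k*(k+1)
theorem two_calcNegAux (trackLen k : Int) :
    0 < k → 2 * calcNegAux trackLen k = 2 * trackLen + k * (k + 1) := by
  induction trackLen, k using calcNegAux.induct with
  | case1 trackLen k hk ih =>
    intro _
    rw [calcNegAux, dif_pos hk]
    by_cases h1 : 0 < k - 1
    · linear_combination ih h1
    · have h0 : calcNegAux (trackLen + k) (k - 1) = trackLen + k := by
        rw [calcNegAux, dif_neg h1]
      have hk1 : k = 1 := by omega
      rw [h0, hk1]; ring
  | case2 trackLen k hk => intro h; exact absurd h hk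

theorem calcNegAux_eq (k : Int) : calcNegAux 0 k = contribB k (-1) := by
  by_cases hk : 0 < k
  · have h := two_calcNegAux 0 k hk
    simp only [contribB, if_neg (show ¬ k ≤ 0 from by omega)]
    rw [if_pos (by trivial), PySem.Int.floordiv_eq_ediv_of_pos (by norm_num)]
    omega
  · rw [calcNegAux, dif_neg hk]
    simp [contribB, show k ≤ 0 from by omega]

-- the bounded countdown loop, doubled
theorem two_calcPosAux (trackLen times k : Int) :
    0 < times → 0 < k →
      2 * calcPosAux trackLen times k =
        2 * trackLen + 2 * (min times k * k) - min times k * (min times k - 1) := by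
  induction trackLen, times, k using calcPosAux.induct with
  | case1 trackLen times k hg ih =>
    intro ht hk
    rw [calcPosAux, dif_pos hg]
    by_cases h1 : 0 < times - 1 ∧ 0 < k - 1
    · have h := ih h1.1 h1.2
      have hmin' : min (times - 1) (k - 1) = min times k - 1 := by omega
      rw [hmin'] at h
      linear_combination h
    · have h0 : calcPosAux (trackLen + k) (times - 1) (k - 1) = trackLen + k := by
        rw [calcPosAux, dif_neg h1]
      have hmin : min times k = 1 := by omega
      rw [h0, hmin]; ring
  | case2 trackLen times k hg => intro ht hk; exact absurd ⟨ht, hk⟩ hg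

theorem calcPosAux_eq (times k : Int) (hne : times ≠ -1) : calcPosAux 0 times k = contribB k times := by
  by_cases hg : 0 < times ∧ 0 < k
  · have h := two_calcPosAux 0 times k hg.1 hg.2
    simp only [contribB, if_neg (show ¬ k ≤ 0 from by omega), if_neg hne,
      if_neg (show ¬ times ≤ 0 from by omega)]
    show calcPosAux 0 times k = min times k * k - PySem.Int.floordiv (min times k * (min times k - 1)) 2
    rw [PySem.Int.floordiv_eq_ediv_of_pos (by norm_num)]
    omega
  · rw [calcPosAux, dif_neg hg]
    by_cases hk : k ≤ 0
    · simp [contribB, hk]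
    · have ht : times ≤ 0 := by
        rcases not_and_or.mp hg with h | h <;> omega
      simp [contribB, hk, hne, ht]

theorem calc_eq (times k : Int) : calcPosNTimes times k = contribB k times := by
  unfold calcPosNTimes
  by_cases h : times = -1
  · rw [if_pos h, h, calcNegAux_eq]
  · rw [if_neg h, calcPosAux_eq times k h]

theorem contribB_nonneg (k times : Int) : 0 ≤ contribB k times := by
  unfold contribB
  split_ifs with h1 h2 h3
  · exact le_refl 0
  · rw [PySem.Int.floordiv_eq_ediv_of_pos (by norm_num)]
    apply Int.ediv_nonneg _ (by norm_num)
    nlinarith [show (0 : Int) < k from by omega]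
  · exact le_refl 0
  · show 0 ≤ min times k * k - PySem.Int.floordiv (min times k * (min times k - 1)) 2
    rw [PySem.Int.floordiv_eq_ediv_of_pos (by norm_num)]
    have h4 : 1 ≤ min times k := by omega
    have h5 : min times k ≤ k := min_le_right _ _
    have h6 : min times k * (min times k - 1) ≤ min times k * k := by nlinarith
    have h7 : 0 ≤ min times k * k := by nlinarith
    have h8 : min times k * (min times k - 1) / 2 ≤ min times k * k := by
      calc min times k * (min times k - 1) / 2 ≤ min times k * k / 2 :=
            Int.ediv_le_ediv (by norm_num) h6
        _ ≤ min times k * k := Int.ediv_le_self _ h7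
    linarith [h8]

-- early exit is redundant: the loop answers "does the grand total reach trackLength"
theorem aLoop_eq (trackLength k : Int) (spells : List Int) (idxs : List Int) (position : Int) :
    aLoop trackLength k spells position idxs =
      decide (position + ((idxs.map (fun i => contribB k (PySem.List.pyGetD spells (i + 1) 0 - PySem.List.pyGetD spells i 0))).sum) + contribB k (-1) ≥ trackLength) := by
  induction idxs generalizing position with
  | nil => simp [aLoop, calc_eq]
  | cons i rest ih =>
    simp only [aLoop, List.map_cons, List.sum_cons, calc_eq]
    by_cases hge : position + contribB k (PySem.List.pyGetD spells (i + 1) 0 - PySem.List.pyGetD spells i 0) ≥ trackLength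
    · rw [if_pos hge]
      have h1 : 0 ≤ (rest.map (fun i => contribB k (PySem.List.pyGetD spells (i + 1) 0 - PySem.List.pyGetD spells i 0))).sum := by
        apply List.sum_nonneg
        intro x hx
        obtain ⟨j, _, rfl⟩ := List.mem_map.mp hx
        exact contribB_nonneg _ _
      have h2 : 0 ≤ contribB k (-1) := contribB_nonneg k (-1)
      symm
      simp only [decide_eq_true_iff]
      linarith
    · rw [if_neg hge, ih]
      rw [decide_eq_decide]
      constructor <;> intro h <;> linarith

-- the indexed sum over range(0, len-1) is the sum over consecutive pairs (Nat form)
theorem sum_idx_eq_zip (g : Int → Int) (xs : List Int) :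
    ((List.range (xs.length - 1)).map (fun i => g (xs.getD (i + 1) 0 - xs.getD i 0))).sum =
      ((xs.zip xs.tail).map (fun p => g (p.2 - p.1))).sum := by
  induction xs with
  | nil => simp
  | cons a xs ih =>
    cases xs with
    | nil => simp
    | cons b t =>
      have hlen : (a :: b :: t).length - 1 = (b :: t).length - 1 + 1 := by simp
      rw [hlen, List.range_succ_eq_map, List.map_cons, List.sum_cons, List.map_map]
      have hfun : ((fun i => g ((a :: b :: t).getD (i + 1) 0 - (a :: b :: t).getD i 0)) ∘ Nat.succ)
          = fun i => g ((b :: t).getD (i + 1) 0 - (b :: t).getD i 0) := by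
        funext i
        simp [Function.comp]
      rw [hfun, ih]
      simp

-- the same, stated on the pyRange/pyGetD form A uses
theorem range_sum_eq (g : Int → Int) (spells : List Int) :
    ((PySem.List.pyRange 0 ((spells.length : Int) - 1) 1).map
        (fun i => g (PySem.List.pyGetD spells (i + 1) 0 - PySem.List.pyGetD spells i 0))).sum =
      ((spells.zip spells.tail).map (fun p => g (p.2 - p.1))).sum := by
  rw [PySem.List.pyRange_zero, List.map_map]
  have htn : ((spells.length : Int) - 1).toNat = spells.length - 1 := by omega
  rw [htn]
  have hfun : ((fun i => g (PySem.List.pyGetD spells (i + 1) 0 - PySem.List.pyGetD spells i 0)) ∘ (fun (n : Nat) => (n : Int)))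
      = fun (n : Nat) => g (spells.getD (n + 1) 0 - spells.getD n 0) := by
    funext n
    simp only [Function.comp_apply]
    have h1 : ((n : Int) + 1) = ((n + 1 : Nat) : Int) := by push_cast; ring
    rw [h1, PySem.List.pyGetD_natCast, PySem.List.pyGetD_natCast]
  rw [hfun, sum_idx_eq_zip]

-- ===== VERDICT (by name: the statement is the Claim_ definition above) =====
theorem canReachTrackEnd_spec : Claim_equal_canReachTrackEnd := by
  intro trackLength spells k _
  show canReachTrackEnd trackLength spells k = canReachTrackEnd_alt trackLength spells k
  unfold canReachTrackEnd canReachTrackEnd_alt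
  rw [aLoop_eq, PySem.List.foldl_add, PySem.List.slice_from_one, range_sum_eq]
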